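-- pv_equiv track=rewrite | github.com/realFincho/Competitive-pyprogramming | strings/z-function.py | common_prefix_suffix1
-- ===== SOURCE A (Python) =====
-- def common_prefix_suffix1(s):
--     m = len(s)
--     occur = 0
--     # substring length 1 -- m-1
--     for i in range(1, m):
--         # substring position 0 -- m-1-i
--         for j in range(m - i + 1):
--             mismatch1 = False
--             mismatch2 = False
--             for k in range(i):
--                 # prefix
--                 if s[k] != s[j + k]:
--                     mismatch1 = True
--                 # suffix
--                 if s[m - i + k] != s[j + k]:
--                     mismatch2 = True
--             if mismatch1 != mismatch2:
--                 occur += 1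
--     return occur
-- ===== SOURCE B (Python) =====
-- def _match_len(s, j):
--     # length of the longest common prefix of s and s[j:]
--     m = len(s)
--     k = 0
--     while j + k < m and s[k] == s[j + k]:
--         k += 1
--     return k
--
--
-- def _tail_match_len(s, e):
--     # length of the longest common suffix of s[:e] and s
--     m = len(s)
--     k = 0
--     while k < e and s[e - 1 - k] == s[m - 1 - k]:
--         k += 1
--     return k
--
--
-- def common_prefix_suffix1(s):
--     m = len(s)
--     pre = [_match_len(s, j) for j in range(m)]        # pre[j] >= i  <=>  s[j:j+i] == s[:i]
--     suf = [_tail_match_len(s, e) for e in range(m + 1)]  # suf[e] >= i  <=>  s[e-i:e] == s[m-i:]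
--     total = 0
--     for i in range(1, m):
--         if pre[m - i] < i:  # prefix of length i differs from suffix of length i
--             total += sum(1 for j in range(m - i + 1) if pre[j] >= i)
--             total += sum(1 for j in range(m - i + 1) if suf[j + i] >= i)
--     return total
-- ===== Notes on version B (the rewrite author's own statement) =====
-- stated objective: faster
-- what changed: Instead of re-comparing every substring character by character against the prefix and the suffix (three nested loops), B precomputes for every position the longest match with the prefix (and, anchored at each end position, with the suffix) and then counts per length i the prefix-matches plus suffix-matches whenever the length-i prefix and suffix differ (inclusion-exclusion: when they coincide the XOR count is 0, otherwise no position can match both).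
import Mathlib
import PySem

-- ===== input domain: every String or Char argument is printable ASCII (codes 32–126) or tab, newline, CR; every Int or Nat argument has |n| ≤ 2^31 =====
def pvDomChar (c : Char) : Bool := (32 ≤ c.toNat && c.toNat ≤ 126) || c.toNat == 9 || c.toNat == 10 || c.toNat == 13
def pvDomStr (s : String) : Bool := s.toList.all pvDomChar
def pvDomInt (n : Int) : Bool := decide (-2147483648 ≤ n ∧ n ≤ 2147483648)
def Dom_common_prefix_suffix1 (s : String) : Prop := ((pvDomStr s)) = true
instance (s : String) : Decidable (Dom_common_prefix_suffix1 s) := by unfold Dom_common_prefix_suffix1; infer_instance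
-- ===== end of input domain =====

-- B replaces A's triple character-comparison loop by precomputed longest-match arrays and
-- per-length inclusion-exclusion counting (objective: faster).

-- ===== PORT A =====
-- literal transliteration of A: for each length i and position j, scan the i characters,
-- flagging a prefix mismatch and a suffix mismatch, and count positions where exactly one flag is set
def common_prefix_suffix1 (s : String) : Int :=
  let l := s.toList
  let m := l.length
  (List.range' 1 (m - 1)).foldl (fun occur i =>
    (List.range (m - i + 1)).foldl (fun occur j =>
      let mm := (List.range i).foldl (fun (p : Bool × Bool) k =>
        ((if l.getD k ' ' ≠ l.getD (j + k) ' ' then true else p.1),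
         (if l.getD (m - i + k) ' ' ≠ l.getD (j + k) ' ' then true else p.2)))
        (false, false)
      if mm.1 ≠ mm.2 then occur + 1 else occur) occur) 0

-- ===== PORT B =====
-- _match_len(s, j): while loop comparing s[k] with s[j+k]
def matchLen (l : List Char) (j : Nat) (k : Nat) : Nat :=
  if j + k < l.length ∧ l.getD k ' ' = l.getD (j + k) ' ' then matchLen l j (k + 1) else k
termination_by l.length - (j + k)
decreasing_by omega

-- _tail_match_len(s, e): while loop comparing s[e-1-k] with s[m-1-k]
def tailMatchLen (l : List Char) (e : Nat) (k : Nat) : Nat :=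
  if k < e ∧ l.getD (e - 1 - k) ' ' = l.getD (l.length - 1 - k) ' ' then tailMatchLen l e (k + 1) else k
termination_by e - k
decreasing_by omega

def common_prefix_suffix1_alt (s : String) : Int :=
  let l := s.toList
  let m := l.length
  let pre := (List.range m).map (fun j => matchLen l j 0)
  let suf := (List.range (m + 1)).map (fun e => tailMatchLen l e 0)
  (List.range' 1 (m - 1)).foldl (fun total i =>
    if pre.getD (m - i) 0 < i then
      total + ((List.range (m - i + 1)).countP (fun j => decide (i ≤ pre.getD j 0)) : Int)
            + ((List.range (m - i + 1)).countP (fun j => decide (i ≤ suf.getD (j + i) 0)) : Int)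
    else total) 0

-- ===== PRECONDITION & SPEC =====
def Spec_common_prefix_suffix1 (s : String) (out : Int) : Prop := out = common_prefix_suffix1_alt s
instance (s : String) (out : Int) : Decidable (Spec_common_prefix_suffix1 s out) := by unfold Spec_common_prefix_suffix1; infer_instance

-- ===== CLAIM (what is proved, stated in full; the proofs are below) =====
def Claim_equal_common_prefix_suffix1 : Prop := ∀ (s : String), Dom_common_prefix_suffix1 s → Spec_common_prefix_suffix1 s (common_prefix_suffix1 s)

-- ===== LEMMAS AND PROOFS =====

theorem pv_matchLen_spec (l : List Char) (j : Nat) : ∀ (k : Nat),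
    k ≤ matchLen l j k ∧
    (∀ t, k ≤ t → t < matchLen l j k → (j + t < l.length ∧ l.getD t ' ' = l.getD (j + t) ' ')) ∧
    ¬ (j + matchLen l j k < l.length ∧ l.getD (matchLen l j k) ' ' = l.getD (j + matchLen l j k) ' ') := by
  intro k
  fun_induction matchLen l j k with
  | case1 k hc ih =>
    obtain ⟨ih1, ih2, ih3⟩ := ih
    refine ⟨by omega, ?_, ih3⟩
    intro t ht1 ht2
    rcases Nat.eq_or_lt_of_le ht1 with h | h
    · subst h; exact hc
    · exact ih2 t h ht2
  | case2 k hc =>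
    exact ⟨le_refl _, fun t ht1 ht2 => absurd ht2 (by omega), hc⟩

theorem pv_matchLen_ge_iff (l : List Char) (j i : Nat) :
    i ≤ matchLen l j 0 ↔ ∀ t, t < i → (j + t < l.length ∧ l.getD t ' ' = l.getD (j + t) ' ') := by
  obtain ⟨h0, hgood, hstop⟩ := pv_matchLen_spec l j 0
  constructor
  · intro h t ht
    exact hgood t (Nat.zero_le _) (lt_of_lt_of_le ht h)
  · intro h
    by_contra hlt
    exact hstop (h _ (by omega))

theorem pv_tailMatchLen_spec (l : List Char) (e : Nat) : ∀ (k : Nat),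
    k ≤ tailMatchLen l e k ∧
    (∀ t, k ≤ t → t < tailMatchLen l e k → (t < e ∧ l.getD (e - 1 - t) ' ' = l.getD (l.length - 1 - t) ' ')) ∧
    ¬ (tailMatchLen l e k < e ∧ l.getD (e - 1 - tailMatchLen l e k) ' ' = l.getD (l.length - 1 - tailMatchLen l e k) ' ') := by
  intro k
  fun_induction tailMatchLen l e k with
  | case1 k hc ih =>
    obtain ⟨ih1, ih2, ih3⟩ := ih
    refine ⟨by omega, ?_, ih3⟩
    intro t ht1 ht2
    rcases Nat.eq_or_lt_of_le ht1 with h | h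
    · subst h; exact hc
    · exact ih2 t h ht2
  | case2 k hc =>
    exact ⟨le_refl _, fun t ht1 ht2 => absurd ht2 (by omega), hc⟩

theorem pv_tailMatchLen_ge_iff (l : List Char) (e i : Nat) :
    i ≤ tailMatchLen l e 0 ↔ ∀ t, t < i → (t < e ∧ l.getD (e - 1 - t) ' ' = l.getD (l.length - 1 - t) ' ') := by
  obtain ⟨h0, hgood, hstop⟩ := pv_tailMatchLen_spec l e 0
  constructor
  · intro h t ht
    exact hgood t (Nat.zero_le _) (lt_of_lt_of_le ht h)
  · intro h
    by_contra hlt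
    exact hstop (h _ (by omega))


theorem pv_foldl_pair (l : List Char) (m i j : Nat) :
    (List.range i).foldl (fun (p : Bool × Bool) k =>
      ((if l.getD k ' ' ≠ l.getD (j + k) ' ' then true else p.1),
       (if l.getD (m - i + k) ' ' ≠ l.getD (j + k) ' ' then true else p.2))) (false, false)
    = ((List.range i).any (fun k => decide (l.getD k ' ' ≠ l.getD (j + k) ' ')),
       (List.range i).any (fun k => decide (l.getD (m - i + k) ' ' ≠ l.getD (j + k) ' '))) := by
  suffices h : ∀ (n : Nat) (a b : Bool),
      (List.range n).foldl (fun (p : Bool × Bool) k =>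
        ((if l.getD k ' ' ≠ l.getD (j + k) ' ' then true else p.1),
         (if l.getD (m - i + k) ' ' ≠ l.getD (j + k) ' ' then true else p.2))) (a, b)
      = (a || (List.range n).any (fun k => decide (l.getD k ' ' ≠ l.getD (j + k) ' ')),
         b || (List.range n).any (fun k => decide (l.getD (m - i + k) ' ' ≠ l.getD (j + k) ' '))) by
    simpa using h i false false
  intro n
  induction n with
  | zero => simp
  | succ n ih =>
    intro a b
    rw [List.range_succ, List.foldl_append, List.any_append, List.any_append, ih]
    simp only [List.foldl_cons, List.foldl_nil, List.any_cons, List.any_nil]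
    by_cases h1 : l.getD n ' ' ≠ l.getD (j + n) ' ' <;>
      by_cases h2 : l.getD (m - i + n) ' ' ≠ l.getD (j + n) ' ' <;>
        simp [h1, h2, Bool.or_comm, Bool.or_left_comm]

theorem pv_countP_xor (ks : List Nat) (p q : Nat → Bool)
    (hd : ∀ x ∈ ks, ¬(p x = true ∧ q x = true)) :
    ks.countP (fun x => decide (¬ p x = q x)) = ks.countP p + ks.countP q := by
  induction ks with
  | nil => simp
  | cons x t ih =>
    have hx := hd x (by simp)
    have ht : ∀ y ∈ t, ¬(p y = true ∧ q y = true) := fun y hy => hd y (by simp [hy])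
    rw [List.countP_cons, List.countP_cons, List.countP_cons, ih ht]
    cases hp : p x <;> cases hq : q x <;> simp [hp, hq] at hx ⊢ <;> omega

theorem pv_any_eq (i : Nat) (f g : Nat → Bool) (h : ∀ k, k < i → f k = g k) :
    (List.range i).any f = (List.range i).any g := by
  induction i with
  | zero => simp
  | succ n ih =>
    rw [List.range_succ]
    simp [List.any_append, ih (fun k hk => h k (by omega)), h n (by omega)]

theorem pv_getD_map_range (g : Nat → Nat) (m j : Nat) (h : j < m) :
    ((List.range m).map g).getD j 0 = g j := by
  rw [List.getD_eq_getElem?_getD]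
  simp [List.getElem?_map, List.getElem?_range, h]

theorem pv_pre_iff (l : List Char) (i j : Nat) (_hji : j + i ≤ l.length) :
    (i ≤ matchLen l j 0 ↔
      (List.range i).any (fun k => decide (l.getD k ' ' ≠ l.getD (j + k) ' ')) = false) := by
  rw [pv_matchLen_ge_iff]
  simp only [List.any_eq_false, List.mem_range, decide_eq_true_eq, ne_eq, not_not]
  constructor
  · intro h k hk
    exact (h k hk).2
  · intro h t ht
    exact ⟨by omega, h t ht⟩

theorem pv_suf_iff (l : List Char) (i j : Nat) (hi : i ≤ l.length) (hji : j + i ≤ l.length) :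
    (i ≤ tailMatchLen l (j + i) 0 ↔
      (List.range i).any (fun k => decide (l.getD (l.length - i + k) ' ' ≠ l.getD (j + k) ' ')) = false) := by
  rw [pv_tailMatchLen_ge_iff]
  simp only [List.any_eq_false, List.mem_range, decide_eq_true_eq, ne_eq, not_not]
  constructor
  · intro h k hk
    have h2 := (h (i - 1 - k) (by omega)).2
    have e1 : j + i - 1 - (i - 1 - k) = j + k := by omega
    have e2 : l.length - 1 - (i - 1 - k) = l.length - i + k := by omega
    rw [e1, e2] at h2
    exact h2.symm
  · intro h t ht
    refine ⟨by omega, ?_⟩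
    have h2 := h (i - 1 - t) (by omega)
    have e1 : j + (i - 1 - t) = j + i - 1 - t := by omega
    have e2 : l.length - i + (i - 1 - t) = l.length - 1 - t := by omega
    rw [e1, e2] at h2
    exact h2.symm

theorem pv_test_iff (l : List Char) (i : Nat) (h1 : 1 ≤ i) (h2 : i ≤ l.length) :
    (matchLen l (l.length - i) 0 < i ↔
      ∃ k, k < i ∧ l.getD k ' ' ≠ l.getD (l.length - i + k) ' ') := by
  rw [← Nat.not_le, pv_matchLen_ge_iff]
  constructor
  · intro hnot
    by_contra hno
    push_neg at hno
    exact hnot (fun t ht => ⟨by omega, hno t ht⟩)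
  · rintro ⟨k, hk, hne⟩ h
    exact hne (h k hk).2

theorem pv_if_add (cond : Prop) [Decidable cond] (t x y : Int) :
    (if cond then t + x + y else t) = t + (if cond then x + y else 0) := by
  split_ifs <;> ring


theorem pv_per_i (l : List Char) (i : Nat) (hge : 1 ≤ i) (hlt : i < l.length) :
    ((List.countP
        (fun x =>
          decide
            (((List.range i).any fun k => decide (l.getD k ' ' ≠ l.getD (x + k) ' ')) ≠
              (List.range i).any fun k => decide (l.getD (l.length - i + k) ' ' ≠ l.getD (x + k) ' ')))
        (List.range (l.length - i + 1)) : Nat) : Int) =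
    (if (List.map (fun j => matchLen l j 0) (List.range l.length)).getD (l.length - i) 0 < i then
      ((List.countP
          (fun j => decide (i ≤ (List.map (fun j => matchLen l j 0) (List.range l.length)).getD j 0))
          (List.range (l.length - i + 1)) : Nat) : Int)
      + ((List.countP
          (fun j => decide (i ≤ (List.map (fun e => tailMatchLen l e 0) (List.range (l.length + 1))).getD (j + i) 0))
          (List.range (l.length - i + 1)) : Nat) : Int)
    else 0) := by
  rw [pv_getD_map_range _ _ _ (by omega : l.length - i < l.length)]
  have hB1 : List.countP
      (fun j => decide (i ≤ (List.map (fun j => matchLen l j 0) (List.range l.length)).getD j 0))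
      (List.range (l.length - i + 1))
      = List.countP
          (fun j => !((List.range i).any fun k => decide (l.getD k ' ' ≠ l.getD (j + k) ' ')))
          (List.range (l.length - i + 1)) := by
    apply List.countP_congr
    intro j hj
    rw [List.mem_range] at hj
    rw [pv_getD_map_range _ _ _ (by omega : j < l.length)]
    simp only [decide_eq_true_eq, Bool.not_eq_true']
    exact pv_pre_iff l i j (by omega)
  have hB2 : List.countP
      (fun j => decide (i ≤ (List.map (fun e => tailMatchLen l e 0) (List.range (l.length + 1))).getD (j + i) 0))
      (List.range (l.length - i + 1))
      = List.countP
          (fun j => !((List.range i).any fun k => decide (l.getD (l.length - i + k) ' ' ≠ l.getD (j + k) ' ')))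
          (List.range (l.length - i + 1)) := by
    apply List.countP_congr
    intro j hj
    rw [List.mem_range] at hj
    rw [pv_getD_map_range _ _ _ (by omega : j + i < l.length + 1)]
    simp only [decide_eq_true_eq, Bool.not_eq_true']
    exact pv_suf_iff l i j (by omega) (by omega)
  by_cases htest : matchLen l (l.length - i) 0 < i
  · rw [if_pos htest, hB1, hB2]
    obtain ⟨k0, hk0, hne0⟩ := (pv_test_iff l i hge (by omega)).mp htest
    have hdisj : ∀ j ∈ List.range (l.length - i + 1),
        ¬((!((List.range i).any fun k => decide (l.getD k ' ' ≠ l.getD (j + k) ' '))) = true ∧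
          (!((List.range i).any fun k => decide (l.getD (l.length - i + k) ' ' ≠ l.getD (j + k) ' '))) = true) := by
      intro j hj
      rintro ⟨hp, hs⟩
      simp only [Bool.not_eq_true', List.any_eq_false, List.mem_range, decide_eq_true_eq, ne_eq,
        not_not] at hp hs
      exact hne0 ((hp k0 hk0).trans (hs k0 hk0).symm)
    rw [← Nat.cast_add, ← pv_countP_xor _ _ _ hdisj]
    congr 1
    apply List.countP_congr
    intro j hj
    cases hA : ((List.range i).any fun k => decide (l.getD k ' ' ≠ l.getD (j + k) ' ')) <;>
      cases hS : ((List.range i).any fun k => decide (l.getD (l.length - i + k) ' ' ≠ l.getD (j + k) ' ')) <;>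
        simp [hA]
  · rw [if_neg htest]
    have heq : ∀ k, k < i → l.getD k ' ' = l.getD (l.length - i + k) ' ' := by
      rw [pv_test_iff l i hge (by omega)] at htest
      push_neg at htest
      exact htest
    rw [show ((0 : Int) = ((0 : Nat) : Int)) from rfl]
    congr 1
    rw [List.countP_eq_zero]
    intro j hj
    simp only [decide_eq_true_eq, ne_eq, not_not]
    apply pv_any_eq
    intro k hk
    rw [heq k hk]

-- ===== VERDICT (by name: the statement is the Claim_ definition above) =====
theorem common_prefix_suffix1_spec : Claim_equal_common_prefix_suffix1 := by
  intro s _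
  unfold Spec_common_prefix_suffix1
  simp only [common_prefix_suffix1, common_prefix_suffix1_alt]
  simp only [pv_foldl_pair, PySem.List.foldl_ite_add_one, pv_if_add]
  rw [PySem.List.foldl_add, PySem.List.foldl_add]
  congr 1
  congr 1
  apply List.map_congr_left
  intro i hi
  rw [List.mem_range'_1] at hi
  exact pv_per_i s.toList i hi.1 (by omega)
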